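-- pv_equiv track=rewrite | github.com/pypi-data/pypi-mirror-396 | packages/anyt/anyt-0.11.3-py3-none-any.whl/cli/commands/sync/converters.py | _parse_task_md
-- ===== SOURCE A (Python) =====
-- def _parse_task_md(content: str) -> tuple[str, str]:
--     """Parse task.md into (title, description).
--
--     The title is extracted from the first line starting with '# '.
--     The description is the remaining content after the title.
--
--     Args:
--         content: Raw content of task.md file
--
--     Returns:
--         Tuple of (title, description)
--     """
--     lines = content.strip().split("\n")
--     title = ""
--     desc_start = 0
--
--     for i, line in enumerate(lines):
--         if line.startswith("# "):
--             title = line[2:].strip()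
--             desc_start = i + 1
--             break
--
--     description = "\n".join(lines[desc_start:]).strip()
--     return title, description
-- ===== SOURCE B (Python) =====
-- def _parse_task_md(content: str) -> tuple[str, str]:
--     """Streaming rewrite: peel one line at a time with str.partition instead of
--     split/enumerate/index/join."""
--     text = content.strip()
--     rest = text
--     while True:
--         line, sep, rest = rest.partition("\n")
--         if line.startswith("# "):
--             return line[2:].strip(), rest.strip()
--         if not sep:
--             return "", text
-- ===== Notes on version B (the rewrite author's own statement) =====
-- stated objective: simpler
-- what changed: B replaces A's split-into-a-list / enumerate-with-index / join-the-remainder traversal by a streaming loop that peels one line at a time with str.partition, returning directly from the loop; no line list, no index bookkeeping, no join.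
import Mathlib
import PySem

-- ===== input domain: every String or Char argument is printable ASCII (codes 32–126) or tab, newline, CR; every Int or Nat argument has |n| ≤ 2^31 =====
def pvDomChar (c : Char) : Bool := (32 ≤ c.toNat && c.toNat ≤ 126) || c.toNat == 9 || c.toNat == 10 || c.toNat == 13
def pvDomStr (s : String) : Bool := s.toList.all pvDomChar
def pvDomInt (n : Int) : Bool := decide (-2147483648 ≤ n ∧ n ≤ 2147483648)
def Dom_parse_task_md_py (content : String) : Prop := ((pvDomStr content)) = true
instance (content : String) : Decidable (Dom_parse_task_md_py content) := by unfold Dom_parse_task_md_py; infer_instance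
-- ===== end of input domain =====

-- B replaces A's split-into-list / enumerate-with-index / join-the-remainder traversal by a
-- streaming loop that peels one line at a time with str.partition; same return value, simpler code.

-- ===== PORT A =====
-- the 'for i, line in enumerate(lines): … break' loop; returns (title, desc_start)
def aLoopC : List (List Char) → Int → List Char × Int
  | [], _ => ([], 0)
  | line :: restLines, i =>
    if PySem.Chars.startswith line ['#', ' '] then
      (PySem.Chars.strip (PySem.List.slice line (some 2) none), i + 1)
    else aLoopC restLines (i + 1)

def parse_task_md_py (content : String) : String × String :=
  let lines := PySem.Chars.splitOn (PySem.Chars.strip content.toList) ['\n']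
  let r := aLoopC lines 0
  (String.ofList r.1,
   String.ofList (PySem.Chars.strip (PySem.Chars.join ['\n'] (PySem.List.slice lines (some r.2) none))))

-- ===== PORT B =====
-- hand port of rest.partition("\n") for the fixed one-char separator: exact; the Bool component
-- records whether the separator was found (Python's middle component "\n" vs "")
def pvPartitionNl : List Char → List Char × Bool × List Char
  | [] => ([], false, [])
  | c :: rest =>
    if c = '\n' then ([], true, rest)
    else
      let r := pvPartitionNl rest
      (c :: r.1, r.2.1, r.2.2)

-- termination fact for bLoopC (cited by its decreasing_by)
theorem pvPartitionNl_found_lt (s : List Char) (h : (pvPartitionNl s).2.1 = true) :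
    (pvPartitionNl s).2.2.length < s.length := by
  induction s with
  | nil => simp [pvPartitionNl] at h
  | cons c rest ih =>
    by_cases hc : c = '\n'
    · simp [pvPartitionNl, hc]
    · simp only [pvPartitionNl, if_neg hc] at h ⊢
      exact Nat.lt_succ_of_lt (ih h)

-- the 'while True: line, sep, rest = rest.partition("\n") …' loop of B
def bLoopC (text rest : List Char) : List Char × List Char :=
  if PySem.Chars.startswith (pvPartitionNl rest).1 ['#', ' '] then
    (PySem.Chars.strip (PySem.List.slice (pvPartitionNl rest).1 (some 2) none),
     PySem.Chars.strip (pvPartitionNl rest).2.2)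
  else if h : (pvPartitionNl rest).2.1 = true then
    bLoopC text (pvPartitionNl rest).2.2
  else ([], text)
termination_by rest.length
decreasing_by exact pvPartitionNl_found_lt rest h

def parse_task_md_py_alt (content : String) : String × String :=
  let text := PySem.Chars.strip content.toList
  let r := bLoopC text text
  (String.ofList r.1, String.ofList r.2)

-- ===== PRECONDITION & SPEC =====
def Spec_parse_task_md_py (content : String) (out : String × String) : Prop := out = parse_task_md_py_alt content
instance (content : String) (out : String × String) : Decidable (Spec_parse_task_md_py content out) := by unfold Spec_parse_task_md_py; infer_instance

-- ===== CLAIM (what is proved, stated in full; the proofs are below) =====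
def Claim_equal_parse_task_md_py : Prop := ∀ (content : String), Dom_parse_task_md_py content → Spec_parse_task_md_py content (parse_task_md_py content)

-- ===== LEMMAS AND PROOFS =====

theorem dropWhile_ne_nil_of_mem {s : List Char} (h : '\n' ∈ s) :
    s.dropWhile (· ≠ '\n') ≠ [] := by
  intro hnil
  have hs := List.takeWhile_append_dropWhile (p := (· ≠ '\n')) (l := s)
  rw [hnil, List.append_nil] at hs
  have hmem := List.mem_takeWhile_imp (l := s) (x := '\n') (hs ▸ h)
  simp at hmem

-- the line structure of a string: its maximal '\n'-free pieces
def linesOf (s : List Char) : List (List Char) :=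
  if h : '\n' ∈ s then
    s.takeWhile (· ≠ '\n') :: linesOf ((s.dropWhile (· ≠ '\n')).tail)
  else [s]
termination_by s.length
decreasing_by
  have h1 := dropWhile_ne_nil_of_mem h
  have h2 := List.length_dropWhile_le (p := (· ≠ '\n')) (l := s)
  cases hd : s.dropWhile (· ≠ '\n') with
  | nil => exact absurd hd h1
  | cons a t => rw [hd] at h2; simp only [List.tail_cons]; simp at h2 ⊢; omega

theorem linesOf_ne_nil (s : List Char) : linesOf s ≠ [] := by
  unfold linesOf; split <;> simp

theorem linesOf_pos {s : List Char} (h : '\n' ∈ s) :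
    linesOf s = s.takeWhile (· ≠ '\n') :: linesOf ((s.dropWhile (· ≠ '\n')).tail) := by
  rw [linesOf, dif_pos h]

theorem linesOf_neg {s : List Char} (h : '\n' ∉ s) : linesOf s = [s] := by
  rw [linesOf, dif_neg h]

def consHead (p : List Char) : List (List Char) → List (List Char)
  | [] => [p]
  | h :: t => (p ++ h) :: t

theorem consHead_nil (ls : List (List Char)) (h : ls ≠ []) : consHead [] ls = ls := by
  cases ls with
  | nil => exact absurd rfl h
  | cons a t => simp [consHead]

theorem linesOf_nl_cons (rest : List Char) : linesOf ('\n' :: rest) = [] :: linesOf rest := by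
  rw [linesOf_pos (by simp)]
  simp

theorem consHead_snoc (p : List Char) (c : Char) (rest : List Char) (hc : c ≠ '\n') :
    consHead (p ++ [c]) (linesOf rest) = consHead p (linesOf (c :: rest)) := by
  by_cases h : '\n' ∈ rest
  · have hmem : '\n' ∈ c :: rest := by simp [h]
    rw [linesOf_pos h, linesOf_pos hmem]
    simp [consHead, hc, List.append_assoc]
  · have hmem : '\n' ∉ c :: rest := by simp [h, Ne.symm hc]
    rw [linesOf_neg h, linesOf_neg hmem]
    simp [consHead]

theorem go_eq (fuel : Nat) (l cur : List Char) (acc : List (List Char)) (hf : l.length < fuel) :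
    PySem.Chars.splitOn.go ['\n'] fuel l cur acc = acc.reverse ++ consHead cur.reverse (linesOf l) := by
  induction fuel generalizing l cur acc with
  | zero => omega
  | succ f ih =>
    cases l with
    | nil =>
      rw [PySem.Chars.splitOn.go, linesOf_neg (by simp)]
      all_goals simp [consHead]
    | cons c rest =>
      rw [PySem.Chars.splitOn.go]
      simp only [List.length_cons] at hf
      by_cases hc : c = '\n'
      · subst hc
        have hpre : List.isPrefixOf ['\n'] ('\n' :: rest) = true := by simp [List.isPrefixOf]
        rw [if_pos hpre]
        have : List.drop (['\n'] : List Char).length ('\n' :: rest) = rest := by simp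
        rw [this, ih rest [] (cur.reverse :: acc) (by omega)]
        rw [linesOf_nl_cons]
        simp only [List.reverse_nil, List.reverse_cons]
        rw [consHead_nil _ (linesOf_ne_nil rest)]
        simp [consHead]
      · have hpre : List.isPrefixOf ['\n'] (c :: rest) = false := by
          simp [List.isPrefixOf]; exact fun h => absurd h.symm hc
        rw [if_neg (by simp [hpre])]
        rw [ih rest (c :: cur) acc (by omega)]
        rw [List.reverse_cons, consHead_snoc cur.reverse c rest hc]

theorem splitOn_eq_linesOf (s : List Char) :
    PySem.Chars.splitOn s ['\n'] = linesOf s := by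
  rw [PySem.Chars.splitOn, go_eq (s.length + 1) s [] [] (by omega)]
  simp only [List.reverse_nil, List.nil_append]
  exact consHead_nil _ (linesOf_ne_nil s)

theorem mem_linesOf_no_nl (s : List Char) : ∀ l ∈ linesOf s, '\n' ∉ l := by
  induction s using linesOf.induct with
  | case1 s h ih =>
    rw [linesOf_pos h]
    intro l hl
    rcases List.mem_cons.mp hl with rfl | hl
    · intro hmem
      exact absurd (List.mem_takeWhile_imp hmem) (by simp)
    · exact ih l hl
  | case2 s h =>
    rw [linesOf_neg h]
    intro l hl
    simp at hl
    subst hl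
    exact h

theorem join_linesOf (s : List Char) : PySem.Chars.join ['\n'] (linesOf s) = s := by
  induction s using linesOf.induct with
  | case1 s h ih =>
    rw [linesOf_pos h]
    have h1 := dropWhile_ne_nil_of_mem h
    cases hd : s.dropWhile (· ≠ '\n') with
    | nil => exact absurd hd h1
    | cons a t =>
      have ha' : a = '\n' := by
        have hh := List.head_dropWhile_not (fun x => decide (x ≠ '\n')) (l := s) h1
        simp only [hd, List.head_cons] at hh
        simpa using hh
      subst ha'
      rw [hd] at ih
      simp only [List.tail_cons] at ih
      cases hlo : linesOf t with
      | nil => exact absurd hlo (linesOf_ne_nil t)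
      | cons x xs =>
        rw [hlo] at ih
        have : PySem.Chars.join ['\n'] (s.takeWhile (· ≠ '\n') :: x :: xs)
            = s.takeWhile (· ≠ '\n') ++ ['\n'] ++ PySem.Chars.join ['\n'] (x :: xs) := by
          simp [PySem.Chars.join, List.intercalate]
        rw [List.tail_cons, hlo]
        rw [this, ih]
        have hs := List.takeWhile_append_dropWhile (p := (· ≠ '\n')) (l := s)
        rw [hd] at hs
        simpa [List.append_assoc] using hs
  | case2 s h =>
    rw [linesOf_neg h]
    simp [PySem.Chars.join, List.intercalate]

-- first heading line of a list of lines: its title and index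
def headScan : List (List Char) → Option (List Char × Nat)
  | [] => none
  | l :: r =>
    if PySem.Chars.startswith l ['#', ' '] then
      some (PySem.Chars.strip (PySem.List.slice l (some 2) none), 0)
    else (headScan r).map (fun p => (p.1, p.2 + 1))

theorem headScan_cons_neg (l : List Char) (r : List (List Char))
    (hl : ¬ PySem.Chars.startswith l ['#', ' '] = true) :
    headScan (l :: r) = (headScan r).map (fun p => (p.1, p.2 + 1)) := by
  rw [headScan, if_neg hl]

theorem aLoopC_eq_headScan (ls : List (List Char)) (i : Int) :
    aLoopC ls i = match headScan ls with
      | none => ([], 0)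
      | some (t, k) => (t, i + k + 1) := by
  induction ls generalizing i with
  | nil => simp [aLoopC, headScan]
  | cons l r ih =>
    by_cases hl : PySem.Chars.startswith l ['#', ' ']
    · simp [aLoopC, headScan, hl]
    · rw [aLoopC, if_neg hl, headScan_cons_neg l r hl, ih (i + 1)]
      cases headScan r with
      | none => simp
      | some p =>
        simp only [Option.map_some, Prod.mk.injEq, true_and]
        push_cast
        omega

theorem pvPartitionNl_no_nl (l : List Char) (h : '\n' ∉ l) : pvPartitionNl l = (l, false, []) := by
  induction l with
  | nil => rfl
  | cons c rest ih =>
    have hc : c ≠ '\n' := by intro hh; exact h (by simp [hh])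
    rw [pvPartitionNl, if_neg hc, ih (fun hm => h (by simp [hm]))]

theorem pvPartitionNl_append (l r : List Char) (h : '\n' ∉ l) :
    pvPartitionNl (l ++ '\n' :: r) = (l, true, r) := by
  induction l with
  | nil => simp [pvPartitionNl]
  | cons c rest ih =>
    have hc : c ≠ '\n' := by intro hh; exact h (by simp [hh])
    rw [List.cons_append, pvPartitionNl, if_neg hc, ih (fun hm => h (by simp [hm]))]

theorem bLoopC_join (ls : List (List Char)) (hnl : ∀ l ∈ ls, '\n' ∉ l) (text : List Char) :
    bLoopC text (PySem.Chars.join ['\n'] ls) =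
      match headScan ls with
      | none => ([], text)
      | some (t, k) => (t, PySem.Chars.strip (PySem.Chars.join ['\n'] (ls.drop (k + 1)))) := by
  induction ls with
  | nil =>
    rw [bLoopC]
    simp [PySem.Chars.join, List.intercalate, pvPartitionNl, PySem.Chars.startswith, headScan]
  | cons l r ih =>
    cases r with
    | nil =>
      have hj : PySem.Chars.join ['\n'] [l] = l := by simp [PySem.Chars.join, List.intercalate]
      rw [hj, bLoopC, pvPartitionNl_no_nl l (hnl l (by simp))]
      by_cases hl : PySem.Chars.startswith l ['#', ' ']
      · simp [hl, headScan, PySem.Chars.join, List.intercalate, PySem.Chars.strip,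
          PySem.Chars.lstrip, PySem.Chars.rstrip]
      · simp [hl, headScan]
    | cons x xs =>
      have hj : PySem.Chars.join ['\n'] (l :: x :: xs) = l ++ '\n' :: PySem.Chars.join ['\n'] (x :: xs) := by
        simp [PySem.Chars.join, List.intercalate]
      rw [hj, bLoopC, pvPartitionNl_append l _ (hnl l (by simp))]
      by_cases hl : PySem.Chars.startswith l ['#', ' ']
      · simp [hl, headScan]
      · simp only [hl, Bool.false_eq_true, if_false, dite_eq_ite, if_true]
        rw [ih (fun m hm => hnl m (by simp [hm]))]
        rw [headScan_cons_neg l _ hl]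
        cases headScan (x :: xs) with
        | none => simp
        | some p => simp [List.drop_succ_cons]

theorem head_dropWhile_false {p : Char → Bool} {l t : List Char} {c : Char}
    (h : l.dropWhile p = c :: t) : p c = false := by
  have := List.head_dropWhile_not p (l := l) (by simp [h])
  simpa [h] using this

theorem dropWhile_idem (p : Char → Bool) (l : List Char) :
    (l.dropWhile p).dropWhile p = l.dropWhile p := by
  cases hd : l.dropWhile p with
  | nil => rfl
  | cons c t => rw [List.dropWhile_cons_of_neg (by simp [head_dropWhile_false hd])]

theorem rstrip_prefix (u : List Char) : PySem.Chars.rstrip u <+: u := by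
  rw [PySem.Chars.rstrip]
  have := List.dropWhile_suffix (l := u.reverse) PySem.Chars.isspace
  rw [← List.reverse_reverse ((u.reverse.dropWhile PySem.Chars.isspace))] at this
  exact List.reverse_suffix.mp (by simpa using this)

theorem lstrip_rstrip_lstrip (s : List Char) :
    PySem.Chars.lstrip (PySem.Chars.rstrip (PySem.Chars.lstrip s)) = PySem.Chars.rstrip (PySem.Chars.lstrip s) := by
  cases hu : PySem.Chars.lstrip s with
  | nil => simp [PySem.Chars.rstrip, PySem.Chars.lstrip]
  | cons c u' =>
    have hc : PySem.Chars.isspace c = false := by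
      have : s.dropWhile PySem.Chars.isspace = c :: u' := by simpa [PySem.Chars.lstrip] using hu
      exact head_dropWhile_false this
    cases hr : PySem.Chars.rstrip (c :: u') with
    | nil => simp [PySem.Chars.lstrip]
    | cons d v =>
      have hpre : PySem.Chars.rstrip (c :: u') <+: c :: u' := rstrip_prefix (c :: u')
      rw [hr] at hpre
      have hd : d = c := by
        rcases hpre with ⟨w, hw⟩
        exact (List.cons_eq_cons.mp hw).1
      subst hd
      rw [PySem.Chars.lstrip, List.dropWhile_cons_of_neg (by simp [hc])]

theorem rstrip_idem (u : List Char) : PySem.Chars.rstrip (PySem.Chars.rstrip u) = PySem.Chars.rstrip u := by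
  rw [PySem.Chars.rstrip, PySem.Chars.rstrip, List.reverse_reverse, dropWhile_idem]

theorem strip_idem (s : List Char) : PySem.Chars.strip (PySem.Chars.strip s) = PySem.Chars.strip s := by
  rw [PySem.Chars.strip, PySem.Chars.strip, lstrip_rstrip_lstrip, rstrip_idem]

-- ===== VERDICT (by name: the statement is the Claim_ definition above) =====
theorem parse_task_md_py_spec : Claim_equal_parse_task_md_py := by
  intro content _
  unfold Spec_parse_task_md_py parse_task_md_py parse_task_md_py_alt
  simp only [splitOn_eq_linesOf]
  set t := PySem.Chars.strip content.toList with ht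
  have hB : bLoopC t t = bLoopC t (PySem.Chars.join ['\n'] (linesOf t)) := by
    rw [join_linesOf]
  rw [hB, bLoopC_join (linesOf t) (mem_linesOf_no_nl t) t]
  rw [aLoopC_eq_headScan (linesOf t) 0]
  cases hs : headScan (linesOf t) with
  | none =>
    simp only []
    have h0 : PySem.List.slice (linesOf t) (some (0 : Int)) none = linesOf t := by
      rw [PySem.List.slice_from _ (by omega)]
      simp
    rw [h0, join_linesOf, ht, strip_idem]
  | some p =>
    obtain ⟨ttl, k⟩ := p
    simp only []
    have hk : PySem.List.slice (linesOf t) (some ((0 : Int) + k + 1)) none = (linesOf t).drop (k + 1) := by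
      rw [PySem.List.slice_from _ (by omega)]
      congr 1
      omega
    rw [hk]
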